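-- pv_equiv track=rewrite | github.com/kuratomiwaysure/GNSS-Position-Error-Estimated-by-Machine-Learning-Techniques-with-Environmental-Information-Input | ml_dec_tree2.py | listPerBin
-- ===== SOURCE A (Python) =====
-- def listPerBin(bins,errors):
--
--     size = 0
--     list_per_bin = list()
--     temporal_list = list()
--
--     for i in range(0,len(bins)-1):
--
--         lower_bin = bins[i]
--         upper_bin = bins[i+1]
--
--         [temporal_list.append(x) for x in errors if x >= lower_bin and x <= upper_bin]
--
--         list_per_bin.append(temporal_list[:])
--         size = size + len(temporal_list)
--         temporal_list = []
--
--     return list_per_bin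
-- ===== SOURCE B (Python) =====
-- def listPerBin(bins, errors):
--     # Sort the errors once (tagged with their original position), then locate each
--     # bin's inclusive interval [lo, hi] by binary search in the sorted order and
--     # restore the original order inside the selected block.
--     pairs = sorted(enumerate(errors), key=lambda t: t[1])
--     vals = [v for _, v in pairs]
--     n = len(vals)
--
--     def bisect_left(x):
--         lo, hi = 0, n
--         while lo < hi:
--             mid = (lo + hi) // 2
--             if vals[mid] < x:
--                 lo = mid + 1
--             else:
--                 hi = mid
--         return lo
--
--     def bisect_right(x):
--         lo, hi = 0, n
--         while lo < hi:
--             mid = (lo + hi) // 2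
--             if x < vals[mid]:
--                 hi = mid
--             else:
--                 lo = mid + 1
--         return lo
--
--     out = []
--     for lo_b, hi_b in zip(bins, bins[1:]):
--         block = sorted(pairs[bisect_left(lo_b):bisect_right(hi_b)], key=lambda t: t[0])
--         out.append([v for _, v in block])
--     return out
-- ===== Notes on version B (the rewrite author's own statement) =====
-- stated objective: alternative
-- what changed: B sorts the errors once (tagged with original positions), binary-searches each bin's inclusive bounds into the sorted order to select the block, and re-sorts each block by position, instead of rescanning the whole error list for every bin.
import Mathlib
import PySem

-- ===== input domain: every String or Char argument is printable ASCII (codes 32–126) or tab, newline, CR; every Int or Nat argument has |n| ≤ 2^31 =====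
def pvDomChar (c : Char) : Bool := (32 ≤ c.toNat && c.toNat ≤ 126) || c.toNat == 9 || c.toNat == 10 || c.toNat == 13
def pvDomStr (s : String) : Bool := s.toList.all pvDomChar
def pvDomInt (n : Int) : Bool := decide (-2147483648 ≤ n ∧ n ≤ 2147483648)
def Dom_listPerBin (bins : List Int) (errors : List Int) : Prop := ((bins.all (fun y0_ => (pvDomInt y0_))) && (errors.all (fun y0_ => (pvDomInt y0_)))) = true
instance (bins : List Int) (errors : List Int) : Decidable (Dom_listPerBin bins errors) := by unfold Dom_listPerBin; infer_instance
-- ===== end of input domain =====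

-- B sorts the errors once (tagged with original positions) and binary-searches each
-- bin's inclusive bounds into the sorted order, instead of rescanning all errors per bin.


-- ===== PORT A =====
-- for i in range(0, len(bins)-1): collect errors in [bins[i], bins[i+1]]; 'size' is A's dead accumulator
def listPerBin (bins : List Int) (errors : List Int) : List (List Int) :=
  ((PySem.List.pyRange 0 ((bins.length : Int) - 1) 1).foldl
    (fun st i =>
      let lower_bin := PySem.List.pyGetD bins i 0
      let upper_bin := PySem.List.pyGetD bins (i + 1) 0
      let temporal_list := errors.filter (fun x => decide (lower_bin ≤ x) && decide (x ≤ upper_bin))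
      (st.1 + (temporal_list.length : Int), st.2 ++ [temporal_list]))
    ((0 : Int), ([] : List (List Int)))).2

-- ===== PORT B =====
-- pairs = sorted(enumerate(errors), key=value); per bin: binary-search the block
-- pairs[bisect_left(lo) : bisect_right(hi)], re-sort it by original index, take the values.
-- (Source B's hand-written bisect loops are exactly PySem.List.bisectLeft / bisectRight.)
def listPerBin_alt (bins : List Int) (errors : List Int) : List (List Int) :=
  let pairs := PySem.List.sorted (PySem.List.enumerate errors) (fun t => t.2)
  let vals := pairs.map (fun t => t.2)
  (bins.zip bins.tail).map (fun b =>
    let l := PySem.List.bisectLeft vals b.1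
    let r := PySem.List.bisectRight vals b.2
    let block := PySem.List.sorted
        (PySem.List.slice pairs (some (l : Int)) (some (r : Int))) (fun t => t.1)
    block.map (fun t => t.2))

-- ===== PRECONDITION & SPEC =====
def Spec_listPerBin (bins : List Int) (errors : List Int) (out : List (List Int)) : Prop := out = listPerBin_alt bins errors
instance (bins : List Int) (errors : List Int) (out : List (List Int)) : Decidable (Spec_listPerBin bins errors out) := by unfold Spec_listPerBin; infer_instance

-- ===== CLAIM (what is proved, stated in full; the proofs are below) =====
def Claim_equal_listPerBin : Prop := ∀ (bins : List Int) (errors : List Int), Dom_listPerBin bins errors → Spec_listPerBin bins errors (listPerBin bins errors)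

-- ===== LEMMAS AND PROOFS =====

-- the second component of A's fold just appends the per-index lists
theorem pvA_snd (t : Int → List Int) :
    ∀ (l : List Int) (s : Int) (acc : List (List Int)),
      (l.foldl (fun st i => (st.1 + ((t i).length : Int), st.2 ++ [t i])) (s, acc)).2
        = acc ++ l.map t := by
  intro l
  induction l with
  | nil => simp
  | cons i l ih => intro s acc; simp [ih]

-- indexing consecutive pairs over range(len-1) is zipping the list with its tail
theorem pvIdx (f : Int → Int → List Int) :
    ∀ (bins : List Int),
      (List.range (bins.length - 1)).map
          (fun k => f (bins.getD k 0) (bins.getD (k + 1) 0))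
        = (bins.zip bins.tail).map (fun p => f p.1 p.2) := by
  intro bins
  induction bins with
  | nil => simp
  | cons a t ih =>
      cases t with
      | nil => simp
      | cons b t' =>
          have hlen : (a :: b :: t').length - 1 = t'.length + 1 := by simp
          rw [hlen, List.range_succ_eq_map, List.map_cons, List.map_map]
          have : ((List.range t'.length).map
                    (fun k => f ((a :: b :: t').getD (k + 1) 0) ((a :: b :: t').getD (k + 1 + 1) 0)))
              = (List.range ((b :: t').length - 1)).map
                    (fun k => f ((b :: t').getD k 0) ((b :: t').getD (k + 1) 0)) := by
            simp
          simp only [Function.comp_def, Nat.succ_eq_add_one]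
          rw [this, ih]
          simp

-- A reduces to one filter per consecutive bin pair
theorem pvA_closed (bins errors : List Int) :
    listPerBin bins errors
      = (bins.zip bins.tail).map
          (fun p => errors.filter (fun x => decide (p.1 ≤ x) && decide (x ≤ p.2))) := by
  unfold listPerBin
  rw [pvA_snd]
  rw [PySem.List.pyRange_one]
  have hn : (((bins.length : Int) - 1) - 0).toNat = bins.length - 1 := by omega
  rw [hn, List.map_map]
  have hL :
      (List.range (bins.length - 1)).map
        ((fun i => errors.filter
            (fun x => decide (PySem.List.pyGetD bins i 0 ≤ x) && decide (x ≤ PySem.List.pyGetD bins (i + 1) 0)))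
          ∘ (fun k : ℕ => (0 : Int) + (k : Int)))
      = (List.range (bins.length - 1)).map
          (fun k => (fun lo hi => errors.filter (fun x => decide (lo ≤ x) && decide (x ≤ hi)))
              (bins.getD k 0) (bins.getD (k + 1) 0)) := by
    refine List.map_congr_left (fun k _ => ?_)
    simp only [Function.comp_apply]
    rw [show (0 : Int) + (k : Int) = ((k : ℕ) : Int) by ring,
        show ((k : ℕ) : Int) + 1 = ((k + 1 : ℕ) : Int) by push_cast; ring,
        PySem.List.pyGetD_natCast, PySem.List.pyGetD_natCast]
  rw [hL, pvIdx (fun lo hi => errors.filter (fun x => decide (lo ≤ x) && decide (x ≤ hi))) bins]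
  simp

-- a clamped-slice window whose index range characterises a predicate IS the filter
theorem pvDropTakeFilter {α : Type} (p : α → Bool) :
    ∀ (L : List α) (l r : Nat), l ≤ L.length → r ≤ L.length →
      (∀ (j : Nat) (h : j < L.length), p L[j] = (decide (l ≤ j) && decide (j < r))) →
      (L.drop l).take (r - l) = L.filter p := by
  intro L
  induction L with
  | nil => intro l r _ _ _; simp
  | cons a t ih =>
      intro l r hl hr hidx
      have h0 := hidx 0 (by simp)
      cases l with
      | zero =>
          cases r with
          | zero =>
              have hall : (a :: t).filter p = [] := by
                rw [List.filter_eq_nil_iff]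
                intro x hx
                obtain ⟨j, hj, rfl⟩ := List.getElem_of_mem hx
                simp [hidx j hj]
              simp [hall]
          | succ r' =>
              have ha : p a = true := by simpa using h0
              have ht : (t.drop 0).take (r' - 0) = t.filter p := by
                refine ih 0 r' (by simp) (by simpa using hr) ?_
                intro j hj
                have := hidx (j + 1) (by simpa using Nat.succ_lt_succ hj)
                simpa using this
              simpa [ha] using ht
      | succ l' =>
          have ha : p a = false := by simpa using h0
          have hr' : r - (l' + 1) = (r - 1) - l' := by omega
          have hr2 : r ≤ t.length + 1 := by simpa using hr
          have ht : (t.drop l').take ((r - 1) - l') = t.filter p := by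
            refine ih l' (r - 1) (by simpa using hl) (by omega) ?_
            intro j hj
            have hstep := hidx (j + 1) (by simpa using Nat.succ_lt_succ hj)
            rw [decide_eq_decide.mpr (show (l' + 1 ≤ j + 1) ↔ (l' ≤ j) by omega),
                decide_eq_decide.mpr (show (j + 1 < r) ↔ (j < r - 1) by omega)] at hstep
            simpa using hstep
          simpa [ha, hr'] using ht

-- the per-bin body of B, as a named term for the proof
def pvBinBlock (errors : List Int) (lo hi : Int) : List Int :=
  (PySem.List.sorted
      (PySem.List.slice (PySem.List.sorted (PySem.List.enumerate errors) (fun t => t.2))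
        (some ((PySem.List.bisectLeft
            ((PySem.List.sorted (PySem.List.enumerate errors) (fun t => t.2)).map (fun t => t.2)) lo : Nat) : Int))
        (some ((PySem.List.bisectRight
            ((PySem.List.sorted (PySem.List.enumerate errors) (fun t => t.2)).map (fun t => t.2)) hi : Nat) : Int)))
      (fun t => t.1)).map (fun t => t.2)

-- the filtered enumeration, with the index tags dropped, is the plain filter
theorem pvEnumFilterMap (lo hi : Int) :
    ∀ (es : List Int) (s : Int),
      ((PySem.List.enumerate es s).filter
          (fun t => decide (lo ≤ t.2) && decide (t.2 ≤ hi))).map (fun t => t.2)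
        = es.filter (fun x => decide (lo ≤ x) && decide (x ≤ hi)) := by
  intro es
  induction es with
  | nil => intro s; simp [PySem.List.enumerate]
  | cons f fs ihf =>
      intro s
      rw [PySem.List.enumerate_cons]
      by_cases h : lo ≤ f ∧ f ≤ hi
      · simp only [List.filter_cons]
        simp [h, ihf]
      · simp only [List.filter_cons]
        simp [h, ihf]

-- B's binary-searched, re-sorted block equals A's per-bin filter
theorem pvB_bin (errors : List Int) (lo hi : Int) :
    pvBinBlock errors lo hi = errors.filter (fun x => decide (lo ≤ x) && decide (x ≤ hi)) := by
  unfold pvBinBlock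
  have hsortedVals :
      (((PySem.List.sorted (PySem.List.enumerate errors) (fun t => t.2)).map (fun t => t.2))).Pairwise
        (fun a b => a ≤ b) :=
    PySem.List.sorted_map_key_pairwise (PySem.List.enumerate errors) (fun t => t.2)
  obtain ⟨hlle, hlbelow, hlabove⟩ := PySem.List.bisectLeft_spec _ lo hsortedVals
  obtain ⟨hrle, hrbelow, hrabove⟩ := PySem.List.bisectRight_spec _ hi hsortedVals
  have hlen :
      (((PySem.List.sorted (PySem.List.enumerate errors) (fun t => t.2)).map (fun t => t.2))).length
        = (PySem.List.sorted (PySem.List.enumerate errors) (fun t => t.2)).length := by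
    simp
  have hslice : PySem.List.slice (PySem.List.sorted (PySem.List.enumerate errors) (fun t => t.2))
      (some ((PySem.List.bisectLeft
          ((PySem.List.sorted (PySem.List.enumerate errors) (fun t => t.2)).map (fun t => t.2)) lo : Nat) : Int))
      (some ((PySem.List.bisectRight
          ((PySem.List.sorted (PySem.List.enumerate errors) (fun t => t.2)).map (fun t => t.2)) hi : Nat) : Int))
      = (PySem.List.sorted (PySem.List.enumerate errors) (fun t => t.2)).filter
          (fun t => decide (lo ≤ t.2) && decide (t.2 ≤ hi)) := by
    rw [PySem.List.slice_natCast]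
    refine pvDropTakeFilter _ _ _ _ (hlen ▸ hlle) (hlen ▸ hrle) ?_
    intro j hj
    have hjv : j < (((PySem.List.sorted (PySem.List.enumerate errors) (fun t => t.2)).map (fun t => t.2))).length := by
      omega
    have hv : ((PySem.List.sorted (PySem.List.enumerate errors) (fun t => t.2)).map (fun t => t.2))[j]
        = (PySem.List.sorted (PySem.List.enumerate errors) (fun t => t.2))[j].2 := by
      simp
    by_cases h1 : PySem.List.bisectLeft
        ((PySem.List.sorted (PySem.List.enumerate errors) (fun t => t.2)).map (fun t => t.2)) lo ≤ j
    · by_cases h2 : j < PySem.List.bisectRight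
          ((PySem.List.sorted (PySem.List.enumerate errors) (fun t => t.2)).map (fun t => t.2)) hi
      · have hA := hlabove j hjv h1
        have hB := hrbelow j hjv h2
        rw [hv] at hA hB
        simp [h1, h2, hA, hB]
      · have hC := hrabove j hjv (Nat.le_of_not_lt h2)
        rw [hv] at hC
        have hC' : ¬ (PySem.List.sorted (PySem.List.enumerate errors) (fun t => t.2))[j].2 ≤ hi := by omega
        simp [h2, hC']
    · have hC := hlbelow j hjv (Nat.lt_of_not_le h1)
      rw [hv] at hC
      have hC' : ¬ lo ≤ (PySem.List.sorted (PySem.List.enumerate errors) (fun t => t.2))[j].2 := by omega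
      simp [h1, hC']
  rw [hslice]
  have hperm : ((PySem.List.enumerate errors).filter
        (fun t => decide (lo ≤ t.2) && decide (t.2 ≤ hi))).Perm
      ((PySem.List.sorted (PySem.List.enumerate errors) (fun t => t.2)).filter
        (fun t => decide (lo ≤ t.2) && decide (t.2 ≤ hi))) :=
    (List.Perm.filter _ (PySem.List.sorted_perm (PySem.List.enumerate errors) (fun t => t.2) false)).symm
  have hpw : ((PySem.List.enumerate errors).filter
        (fun t => decide (lo ≤ t.2) && decide (t.2 ≤ hi))).Pairwise
      (fun a b => a.1 < b.1) :=
    (PySem.List.pairwise_lt_enumerate errors 0).filter _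
  rw [PySem.List.sorted_eq_of_perm_of_pairwise_lt _ _ _ hperm hpw]
  exact pvEnumFilterMap lo hi errors 0

theorem listPerBin_eq (bins errors : List Int) :
    listPerBin bins errors = listPerBin_alt bins errors := by
  have hB : listPerBin_alt bins errors
      = (bins.zip bins.tail).map (fun b => pvBinBlock errors b.1 b.2) := rfl
  rw [pvA_closed, hB]
  refine List.map_congr_left (fun p _ => ?_)
  exact (pvB_bin errors p.1 p.2).symm

-- ===== VERDICT (by name: the statement is the Claim_ definition above) =====
theorem listPerBin_spec : Claim_equal_listPerBin := by
  intro bins errors _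
  exact listPerBin_eq bins errors
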